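-- pv_equiv track=rewrite | github.com/tstephx/book-mcp-server | src/tools/project_planning_tools.py | _adjust_for_audience
-- ===== SOURCE A (Python) =====
-- def _adjust_for_audience(content: str, audience: str) -> str:
--     """Adjust content detail level for audience"""
--     if audience == "executive":
--         # Remove technical details
--         lines = content.split("\n")
--         filtered = []
--         skip_section = False
--         for line in lines:
--             if "Technology Decisions" in line or "Data Flows" in line:
--                 skip_section = True
--             elif line.startswith("## ") or line.startswith("# "):
--                 skip_section = False
--
--             if not skip_section:
--                 filtered.append(line)
--         return "\n".join(filtered)
--     return content
-- ===== SOURCE B (Python) =====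
-- def _adjust_for_audience(content: str, audience: str) -> str:
--     """Adjust content detail level for audience"""
--     if audience != "executive":
--         return content
--     # Split into sections at header lines, truncate each section at its
--     # first technical-trigger line, then concatenate.
--     lines = content.split("\n")
--     sections = []
--     cur = []
--     for line in lines:
--         if line.startswith("## ") or line.startswith("# "):
--             sections.append(cur)
--             cur = [line]
--         else:
--             cur.append(line)
--     sections.append(cur)
--     kept = []
--     for sec in sections:
--         idx = next((i for i, l in enumerate(sec)
--                     if "Technology Decisions" in l or "Data Flows" in l), None)
--         kept.extend(sec if idx is None else sec[:idx])
--     return "\n".join(kept)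
-- ===== Notes on version B (the rewrite author's own statement) =====
-- stated objective: alternative
-- what changed: B first splits the content into header-delimited sections and truncates each section at its first technical-trigger line, instead of A's single pass carrying a skip flag across lines.
import Mathlib
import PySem

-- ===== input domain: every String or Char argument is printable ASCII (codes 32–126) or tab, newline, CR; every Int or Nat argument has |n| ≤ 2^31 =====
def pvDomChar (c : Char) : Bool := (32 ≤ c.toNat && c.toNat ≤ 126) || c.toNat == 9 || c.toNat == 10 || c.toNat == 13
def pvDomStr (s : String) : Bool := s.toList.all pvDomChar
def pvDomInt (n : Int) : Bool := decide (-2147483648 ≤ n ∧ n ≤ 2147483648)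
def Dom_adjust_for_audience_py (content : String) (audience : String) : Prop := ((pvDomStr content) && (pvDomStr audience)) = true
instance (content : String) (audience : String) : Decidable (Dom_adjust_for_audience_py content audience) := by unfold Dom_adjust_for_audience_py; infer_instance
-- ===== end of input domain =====

-- B replaces A's single pass with a carried skip flag by a split-into-sections
-- pass that truncates each section at its first technical-trigger line (objective: alternative).

-- shared one-line predicates (the identical conditions both Pythons spell out)
def pvTrig (line : String) : Bool :=
  PySem.Str.isIn "Technology Decisions" line || PySem.Str.isIn "Data Flows" line

def pvHeader (line : String) : Bool :=
  PySem.Str.startswith line "## " || PySem.Str.startswith line "# "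

-- ===== PORT A =====
def adjust_for_audience_py (content : String) (audience : String) : String :=
  if audience == "executive" then
    let lines := (PySem.Str.split? content "\n").getD []
    let st := lines.foldl (fun (st : List String × Bool) line =>
      let skip := if pvTrig line then true
        else if pvHeader line then false
        else st.2
      (if !skip then st.1 ++ [line] else st.1, skip)) ([], false)
    PySem.Str.join "\n" st.1
  else content

-- ===== PORT B =====
-- keep of one section: lines up to (excluding) the first trigger line
def pvKeep (sec : List String) : List String :=
  match sec.findIdx? (fun l => pvTrig l) with
  | some i => sec.take i
  | none => sec

def adjust_for_audience_py_alt (content : String) (audience : String) : String :=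
  if audience != "executive" then content
  else
    let lines := (PySem.Str.split? content "\n").getD []
    let st := lines.foldl (fun (st : List (List String) × List String) line =>
      if pvHeader line then (st.1 ++ [st.2], [line]) else (st.1, st.2 ++ [line]))
      ([], [])
    let sections := st.1 ++ [st.2]
    PySem.Str.join "\n" (sections.flatMap pvKeep)

-- ===== PRECONDITION & SPEC =====
def Spec_adjust_for_audience_py (content : String) (audience : String) (out : String) : Prop := out = adjust_for_audience_py_alt content audience
instance (content : String) (audience : String) (out : String) : Decidable (Spec_adjust_for_audience_py content audience out) := by unfold Spec_adjust_for_audience_py; infer_instance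

-- ===== CLAIM (what is proved, stated in full; the proofs are below) =====
def Claim_equal_adjust_for_audience_py : Prop := ∀ (content : String) (audience : String), Dom_adjust_for_audience_py content audience → Spec_adjust_for_audience_py content audience (adjust_for_audience_py content audience)

-- ===== LEMMAS AND PROOFS =====

-- recursive rendering of A's skip-flag loop (the lines A keeps, from flag state `skip`)
def pvLoopA : List String → Bool → List String
  | [], _ => []
  | l :: ls, skip =>
      let skip' := if pvTrig l then true else if pvHeader l then false else skip
      (if !skip' then [l] else []) ++ pvLoopA ls skip'

theorem pvLoopA_foldl (ls : List String) (acc : List String) (skip : Bool) :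
    (ls.foldl (fun (st : List String × Bool) line =>
      let s := if pvTrig line then true else if pvHeader line then false else st.2
      (if !s then st.1 ++ [line] else st.1, s)) (acc, skip)).1
    = acc ++ pvLoopA ls skip := by
  induction ls generalizing acc skip with
  | nil => simp [pvLoopA]
  | cons l ls ih =>
      simp only [List.foldl_cons, pvLoopA]
      rw [ih]
      by_cases ht : pvTrig l
      · simp [ht]
      · by_cases hhd : pvHeader l
        · simp [ht, hhd]
        · cases skip <;> simp [ht, hhd]

theorem pvKeep_cons (c : String) (xs : List String) :
    pvKeep (c :: xs) = if pvTrig c then [] else c :: pvKeep xs := by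
  unfold pvKeep
  rw [List.findIdx?_cons]
  by_cases h : pvTrig c
  · simp [h]
  · simp only [h, Bool.false_eq_true, if_false]
    cases hf : xs.findIdx? (fun l => pvTrig l) <;> simp

theorem pvKeep_append_singleton (cur : List String) (l : String) :
    pvKeep (cur ++ [l]) = pvKeep cur ++ (if cur.any pvTrig || pvTrig l then [] else [l]) := by
  induction cur with
  | nil => by_cases h : pvTrig l <;> simp [pvKeep, h]
  | cons c cur ih =>
      by_cases h : pvTrig c
      · simp [pvKeep_cons, h]
      · simp [pvKeep_cons, h, ih]

-- the B fold flattened equals A's loop, from any fold state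
theorem pvB_fold_eq (ls : List String) (secs : List (List String)) (cur : List String) :
    (let st := ls.foldl (fun (st : List (List String) × List String) line =>
        if pvHeader line then (st.1 ++ [st.2], [line]) else (st.1, st.2 ++ [line]))
      (secs, cur)
     (st.1 ++ [st.2]).flatMap pvKeep)
    = secs.flatMap pvKeep ++ pvKeep cur ++ pvLoopA ls (cur.any pvTrig) := by
  induction ls generalizing secs cur with
  | nil => simp [pvLoopA]
  | cons l ls ih =>
      simp only [List.foldl_cons]
      by_cases hh : pvHeader l
      · simp only [hh, if_true]
        rw [ih]
        by_cases ht : pvTrig l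
        · simp [pvLoopA, pvKeep_cons, ht]
        · simp [pvLoopA, pvKeep, ht, hh]
      · simp only [hh, Bool.false_eq_true, if_false]
        rw [ih]
        have hany : (cur ++ [l]).any pvTrig = (cur.any pvTrig || pvTrig l) := by simp
        rw [hany, pvKeep_append_singleton]
        by_cases ht : pvTrig l
        · simp [pvLoopA, ht]
        · by_cases hc : cur.any pvTrig <;> simp [pvLoopA, ht, hh, hc]

theorem pvMain (lines : List String) :
    (let st := lines.foldl (fun (st : List (List String) × List String) line =>
        if pvHeader line then (st.1 ++ [st.2], [line]) else (st.1, st.2 ++ [line]))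
      ([], [])
     (st.1 ++ [st.2]).flatMap pvKeep)
    = pvLoopA lines false := by
  rw [pvB_fold_eq]
  simp [pvKeep]

-- ===== VERDICT (by name: the statement is the Claim_ definition above) =====
theorem adjust_for_audience_py_spec : Claim_equal_adjust_for_audience_py := by
  intro content audience _
  unfold Spec_adjust_for_audience_py adjust_for_audience_py adjust_for_audience_py_alt
  by_cases h : audience = "executive"
  · simp only [h, beq_self_eq_true, if_true, bne_self_eq_false, Bool.false_eq_true, if_false]
    rw [pvLoopA_foldl _ [] false, pvMain]
    simp
  · simp [h, bne_iff_ne]
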